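-- pv_equiv track=rewrite | github.com/RomainR99/Game_of_life | grid.py | _turns_to_points
-- ===== SOURCE A (Python) =====
-- def _turns_to_points(turns, step: int = 1):
--     """Convertit la séquence de tours en liste de points (x, y)."""
--     # Direction: 0→, 1↓, 2←, 3↑
--     dx, dy = 1, 0
--     x, y = 0, 0
--     points = [(x, y)]
--     for t in turns:
--         if t == 1:   # droite
--             dx, dy = dy, -dx
--         else:        # gauche
--             dx, dy = -dy, dx
--         x += step * dx
--         y += step * dy
--         points.append((x, y))
--     return points
-- ===== SOURCE B (Python) =====
-- def _turns_to_points(turns, step: int = 1):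
--     """Convertit la séquence de tours en liste de points (x, y)."""
--     DIRS = [(1, 0), (0, -1), (-1, 0), (0, 1)]
--     # Pass 1: rotation deltas -> running rotation count -> direction indices.
--     idxs = []
--     r = 0
--     for t in turns:
--         r += 1 if t == 1 else -1
--         idxs.append(r % 4)
--     # Pass 2: accumulate positions along the indexed directions.
--     points = [(0, 0)]
--     x = y = 0
--     for i in idxs:
--         dx, dy = DIRS[i]
--         x += step * dx
--         y += step * dy
--         points.append((x, y))
--     return points
-- ===== Notes on version B (the rewrite author's own statement) =====
-- stated objective: alternative
-- what changed: Replaced the fused rotate-and-move loop over a mutable (dx,dy) state by a two-pass scheme: first map turns to direction indices via a running rotation count mod 4 into a fixed direction table, then a second pass accumulates the (x,y) points.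
import Mathlib
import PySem

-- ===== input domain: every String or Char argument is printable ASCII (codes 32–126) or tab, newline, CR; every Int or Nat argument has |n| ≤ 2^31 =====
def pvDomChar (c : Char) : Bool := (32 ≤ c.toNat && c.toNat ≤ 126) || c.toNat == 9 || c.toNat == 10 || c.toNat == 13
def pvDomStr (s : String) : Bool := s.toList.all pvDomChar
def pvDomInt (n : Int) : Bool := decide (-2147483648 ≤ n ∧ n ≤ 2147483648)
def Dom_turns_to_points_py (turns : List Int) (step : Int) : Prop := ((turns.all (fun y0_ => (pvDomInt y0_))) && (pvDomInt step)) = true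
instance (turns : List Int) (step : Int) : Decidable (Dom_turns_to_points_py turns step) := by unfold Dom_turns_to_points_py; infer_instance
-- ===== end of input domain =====

-- B replaces A's fused rotate-and-move loop by two passes: turns → direction
-- indices (running rotation count mod 4 into a fixed table), then indices →
-- accumulated points; same O(n) cost, different decomposition (objective: alternative).

-- ===== PORT A =====
def tpA_loop (turns : List Int) (step dx dy x y : Int) (points : List (Int × Int)) : List (Int × Int) :=
  match turns with
  | [] => points
  | t :: rest =>
    let d := if t == 1 then (dy, -dx) else (-dy, dx)
    tpA_loop rest step d.1 d.2 (x + step * d.1) (y + step * d.2)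
      (points ++ [(x + step * d.1, y + step * d.2)])

def turns_to_points_py (turns : List Int) (step : Int) : List (Int × Int) :=
  tpA_loop turns step 1 0 0 0 [(0, 0)]

-- ===== PORT B =====
def pvDIRS : List (Int × Int) := [(1, 0), (0, -1), (-1, 0), (0, 1)]

-- pass 1: running rotation count, reduced mod 4 to a direction index
def tpB_idxs (turns : List Int) (r : Int) : List Int :=
  match turns with
  | [] => []
  | t :: rest =>
    let r' := r + (if t == 1 then 1 else -1)
    PySem.Int.mod r' 4 :: tpB_idxs rest r'

-- pass 2: accumulate points (index is always 0..3, so .getD never takes the default)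
def tpB_acc (idxs : List Int) (step x y : Int) : List (Int × Int) :=
  match idxs with
  | [] => []
  | i :: rest =>
    let d := (PySem.List.pyGet? pvDIRS i).getD (0, 0)
    (x + step * d.1, y + step * d.2) :: tpB_acc rest step (x + step * d.1) (y + step * d.2)

def turns_to_points_py_alt (turns : List Int) (step : Int) : List (Int × Int) :=
  (0, 0) :: tpB_acc (tpB_idxs turns 0) step 0 0

-- ===== PRECONDITION & SPEC =====
def Spec_turns_to_points_py (turns : List Int) (step : Int) (out : List (Int × Int)) : Prop := out = turns_to_points_py_alt turns step
instance (turns : List Int) (step : Int) (out : List (Int × Int)) : Decidable (Spec_turns_to_points_py turns step out) := by unfold Spec_turns_to_points_py; infer_instance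

-- ===== CLAIM (what is proved, stated in full; the proofs are below) =====
def Claim_equal_turns_to_points_py : Prop := ∀ (turns : List Int) (step : Int), Dom_turns_to_points_py turns step → Spec_turns_to_points_py turns step (turns_to_points_py turns step)

-- ===== LEMMAS AND PROOFS =====

-- the direction pvDIRS selects for rotation count r
def pvDir (r : Int) : Int × Int := (PySem.List.pyGet? pvDIRS (PySem.Int.mod r 4)).getD (0, 0)

lemma pvDir_succ (r : Int) : pvDir (r + 1) = ((pvDir r).2, -(pvDir r).1) := by
  unfold pvDir
  rw [PySem.Int.mod_eq_emod_of_pos (by norm_num), PySem.Int.mod_eq_emod_of_pos (by norm_num)]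
  have h4 : r % 4 = 0 ∨ r % 4 = 1 ∨ r % 4 = 2 ∨ r % 4 = 3 := by omega
  rcases h4 with h | h | h | h
  · have h1 : (r + 1) % 4 = 1 := by omega
    rw [h, h1]; decide
  · have h1 : (r + 1) % 4 = 2 := by omega
    rw [h, h1]; decide
  · have h1 : (r + 1) % 4 = 3 := by omega
    rw [h, h1]; decide
  · have h1 : (r + 1) % 4 = 0 := by omega
    rw [h, h1]; decide

lemma pvDir_pred (r : Int) : pvDir (r + -1) = (-(pvDir r).2, (pvDir r).1) := by
  unfold pvDir
  rw [PySem.Int.mod_eq_emod_of_pos (by norm_num), PySem.Int.mod_eq_emod_of_pos (by norm_num)]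
  have h4 : r % 4 = 0 ∨ r % 4 = 1 ∨ r % 4 = 2 ∨ r % 4 = 3 := by omega
  rcases h4 with h | h | h | h
  · have h1 : (r + -1) % 4 = 3 := by omega
    rw [h, h1]; decide
  · have h1 : (r + -1) % 4 = 0 := by omega
    rw [h, h1]; decide
  · have h1 : (r + -1) % 4 = 1 := by omega
    rw [h, h1]; decide
  · have h1 : (r + -1) % 4 = 2 := by omega
    rw [h, h1]; decide

lemma loop_eq (turns : List Int) : ∀ (step r x y : Int) (points : List (Int × Int)),
    tpA_loop turns step (pvDir r).1 (pvDir r).2 x y points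
      = points ++ tpB_acc (tpB_idxs turns r) step x y := by
  induction turns with
  | nil => intro step r x y points; simp [tpA_loop, tpB_idxs, tpB_acc]
  | cons t rest ih =>
    intro step r x y points
    by_cases ht : t = 1
    · have hd : ((pvDir r).2, -(pvDir r).1) = pvDir (r + 1) := (pvDir_succ r).symm
      simp only [tpA_loop, tpB_idxs, tpB_acc, ht, beq_self_eq_true, if_true, hd]
      have hdir : (PySem.List.pyGet? pvDIRS (PySem.Int.mod (r + 1) 4)).getD (0, 0) = pvDir (r + 1) := rfl
      rw [hdir, ih step (r + 1)]
      simp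
    · have hd : (-(pvDir r).2, (pvDir r).1) = pvDir (r + -1) := (pvDir_pred r).symm
      have ht' : (t == 1) = false := by simp [ht]
      simp only [tpA_loop, tpB_idxs, tpB_acc, ht', Bool.false_eq_true, if_false, hd]
      have hdir : (PySem.List.pyGet? pvDIRS (PySem.Int.mod (r + -1) 4)).getD (0, 0) = pvDir (r + -1) := rfl
      rw [hdir, ih step (r + -1)]
      simp

-- ===== VERDICT (by name: the statement is the Claim_ definition above) =====
theorem turns_to_points_py_spec : Claim_equal_turns_to_points_py := by
  intro turns step _
  unfold Spec_turns_to_points_py turns_to_points_py turns_to_points_py_alt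
  have h0 : pvDir 0 = (1, 0) := by decide
  have := loop_eq turns step 0 0 0 [(0, 0)]
  rw [h0] at this
  simpa using this
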